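-- pv_equiv track=rewrite | github.com/alibama/europepmc-disambiguation | app.py | group_departments
-- ===== SOURCE A (Python) =====
-- from itertools import groupby
--
-- def group_departments(departments):
--     def keyfunc(x):
--         return "".join(c for c in x.lower() if c.isalnum())
--     sorted_departments = sorted(departments, key=keyfunc)
--     grouped_departments = []
--     for _, g in groupby(sorted_departments, key=keyfunc):
--         grouped_departments.append(list(g))
--     return grouped_departments
-- ===== SOURCE B (Python) =====
-- def group_departments(departments):
--     def keyfunc(x):
--         return "".join(c for c in x.lower() if c.isalnum())
--     groups = {}
--     for dept in departments:
--         groups.setdefault(keyfunc(dept), []).append(dept)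
--     return [groups[k] for k in sorted(groups)]
-- ===== Notes on version B (the rewrite author's own statement) =====
-- stated objective: idiomatic
-- what changed: Replaces the global stable sort plus itertools.groupby adjacent-run scan with a single-pass dict index from normalized key to originals, then emits groups in sorted-key order.
import Mathlib
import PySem

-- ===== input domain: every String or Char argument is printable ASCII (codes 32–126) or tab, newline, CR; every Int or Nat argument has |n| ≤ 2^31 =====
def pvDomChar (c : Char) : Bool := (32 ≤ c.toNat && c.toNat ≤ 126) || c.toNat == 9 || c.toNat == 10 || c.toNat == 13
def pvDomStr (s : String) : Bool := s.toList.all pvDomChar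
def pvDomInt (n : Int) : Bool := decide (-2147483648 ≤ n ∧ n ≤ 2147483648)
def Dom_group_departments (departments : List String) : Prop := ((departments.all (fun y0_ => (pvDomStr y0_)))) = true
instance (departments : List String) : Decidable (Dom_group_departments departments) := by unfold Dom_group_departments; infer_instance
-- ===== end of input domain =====

-- B replaces A's global stable sort + itertools.groupby adjacent-run scan by a one-pass
-- dict index (normalized key -> originals in encounter order) read out in sorted-key order.


-- ===== PORT A =====
-- keyfunc(x) = "".join(c for c in x.lower() if c.isalnum())   (identical local helper in A and B)
def gdKey (x : String) : String :=
  String.mk ((PySem.Str.lower x).toList.filter (fun c => PySem.Chars.isalnum c))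

-- itertools.groupby's left-to-right scan: current key, current run, finished runs.
def gdRunsAux (k : String) (cur : List String) (acc : List (List String)) :
    List String → List (List String)
  | [] => acc ++ [cur]
  | x :: xs =>
    if gdKey x == k then gdRunsAux k (cur ++ [x]) acc xs
    else gdRunsAux (gdKey x) [x] (acc ++ [cur]) xs

def group_departments (departments : List String) : List (List String) :=
  match PySem.List.sorted departments gdKey with
  | [] => []
  | x :: xs => gdRunsAux (gdKey x) [x] [] xs

-- ===== PORT B =====
def group_departments_alt (departments : List String) : List (List String) :=
  let groups := departments.foldl
    (fun d x => d.modify (gdKey x) [] (fun l => l ++ [x])) PySem.Dict.empty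
  -- groups[k]: k is always a key of the dict here, so getD is exact
  (PySem.List.sorted groups.keys (fun k => k)).map (fun k => groups.getD k [])

-- ===== PRECONDITION & SPEC =====
def Spec_group_departments (departments : List String) (out : List (List String)) : Prop := out = group_departments_alt departments
instance (departments : List String) (out : List (List String)) : Decidable (Spec_group_departments departments out) := by unfold Spec_group_departments; infer_instance

-- ===== CLAIM (what is proved, stated in full; the proofs are below) =====
def Claim_equal_group_departments : Prop := ∀ (departments : List String), Dom_group_departments departments → Spec_group_departments departments (group_departments departments)

-- ===== LEMMAS AND PROOFS =====

-- filter group, sorted distinct keys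
def gdF (xs : List String) (k : String) : List String := xs.filter (fun y => gdKey y == k)
def gdSK (xs : List String) : List String :=
  PySem.List.sorted (PySem.List.dedup (xs.map gdKey)) (fun k => k)

theorem gd_insert_skip (x : String) (g rest : List String)
    (h : ∀ y ∈ g, ¬ gdKey x < gdKey y) :
    PySem.List.insertBy (fun a b => decide (gdKey a < gdKey b)) x (g ++ rest)
      = g ++ PySem.List.insertBy (fun a b => decide (gdKey a < gdKey b)) x rest := by
  induction g with
  | nil => rfl
  | cons y g ih =>
    simp only [List.cons_append, PySem.List.insertBy]
    rw [if_neg (by simpa using h y (by simp))]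
    rw [ih (fun z hz => h z (by simp [hz]))]

theorem gd_front_all (x : String) (ks : List String) (G : String → List String)
    (hne : ∀ k ∈ ks, G k ≠ []) (hkey : ∀ k ∈ ks, ∀ y ∈ G k, gdKey y = k)
    (hlt : ∀ k ∈ ks, gdKey x < k) :
    PySem.List.insertBy (fun a b => decide (gdKey a < gdKey b)) x (ks.flatMap G)
      = x :: ks.flatMap G := by
  cases ks with
  | nil => rfl
  | cons k ks =>
    have h1 : G k ≠ [] := hne k (by simp)
    obtain ⟨y, g, hy⟩ := List.exists_cons_of_ne_nil h1
    have hky : gdKey y = k := hkey k (by simp) y (by simp [hy])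
    have hc : decide (gdKey x < gdKey y) = true := by
      rw [hky]; exact decide_eq_true (hlt k (by simp))
    simp only [List.flatMap_cons, hy, List.cons_append, PySem.List.insertBy]
    rw [if_pos hc]

theorem gd_flatMap_congr (x : String) (ks : List String) (G : String → List String)
    (h : gdKey x ∉ ks) :
    ks.flatMap (fun k => G k ++ if gdKey x == k then [x] else []) = ks.flatMap G := by
  induction ks with
  | nil => rfl
  | cons k ks ih =>
    have hb : ¬ (gdKey x == k) = true := by
      simp only [beq_iff_eq]; intro he; exact h (by simp [he])
    simp only [List.flatMap_cons, ih (fun hm => h (by simp [hm]))]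
    rw [if_neg hb]
    simp

theorem gd_insert_mem (x : String) (ks : List String) (G : String → List String)
    (hp : ks.Pairwise (· < ·))
    (hne : ∀ k ∈ ks, G k ≠ []) (hkey : ∀ k ∈ ks, ∀ y ∈ G k, gdKey y = k)
    (hmem : gdKey x ∈ ks) :
    PySem.List.insertBy (fun a b => decide (gdKey a < gdKey b)) x (ks.flatMap G)
      = ks.flatMap (fun k => G k ++ if gdKey x == k then [x] else []) := by
  induction ks with
  | nil => cases hmem
  | cons k ks ih =>
    simp only [List.flatMap_cons]
    have hlt := (List.pairwise_cons.mp hp).1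
    by_cases hxk : gdKey x = k
    · rw [gd_insert_skip x (G k) _ (fun y hy => by
        rw [hkey k (by simp) y hy, hxk]; exact lt_irrefl k)]
      have hnx : gdKey x ∉ ks := fun hm => absurd (hlt _ hm) (by rw [hxk]; exact lt_irrefl k)
      rw [gd_front_all x ks G (fun k hk => hne k (by simp [hk]))
        (fun k hk => hkey k (by simp [hk])) (fun k hk => hxk ▸ hlt k hk)]
      rw [gd_flatMap_congr x ks G hnx]
      simp [hxk]
    · have hm' : gdKey x ∈ ks := by cases hmem with
        | head => exact absurd rfl hxk
        | tail _ h => exact h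
      have hkx : k < gdKey x := hlt _ hm'
      rw [gd_insert_skip x (G k) _ (fun y hy => by
        rw [hkey k (by simp) y hy]; exact not_lt.mpr (le_of_lt hkx))]
      rw [ih (List.pairwise_cons.mp hp).2 (fun k hk => hne k (by simp [hk]))
        (fun k hk => hkey k (by simp [hk])) hm']
      have : ¬ (gdKey x == k) = true := by simp [hxk]
      simp [this]

theorem gd_insert_notmem (x : String) (ks : List String) (G : String → List String)
    (hp : ks.Pairwise (· < ·))
    (hne : ∀ k ∈ ks, G k ≠ []) (hkey : ∀ k ∈ ks, ∀ y ∈ G k, gdKey y = k)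
    (hmem : gdKey x ∉ ks) (hG : G (gdKey x) = []) :
    PySem.List.insertBy (fun a b => decide (gdKey a < gdKey b)) x (ks.flatMap G)
      = (PySem.List.insertBy (fun a b => decide (a < b)) (gdKey x) ks).flatMap
          (fun k => G k ++ if gdKey x == k then [x] else []) := by
  induction ks with
  | nil => simp [PySem.List.insertBy, hG]
  | cons k ks ih =>
    have hxk : gdKey x ≠ k := fun he => hmem (by simp [he])
    have hlt := (List.pairwise_cons.mp hp).1
    rcases lt_or_gt_of_ne hxk with hl | hg
    · have hall : ∀ k' ∈ k :: ks, gdKey x < k' := by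
        intro k' hk'
        cases hk' with
        | head => exact hl
        | tail _ h => exact lt_trans hl (hlt _ h)
      rw [gd_front_all x (k :: ks) G hne hkey hall]
      have hc : decide (gdKey x < k) = true := decide_eq_true hl
      show _ = List.flatMap _ (PySem.List.insertBy _ _ (k :: ks))
      simp only [PySem.List.insertBy, hc, if_pos]
      conv_rhs => rw [List.flatMap_cons, gd_flatMap_congr x (k :: ks) G hmem]
      simp [hG]
    · simp only [List.flatMap_cons]
      rw [gd_insert_skip x (G k) _ (fun y hy => by
        rw [hkey k (by simp) y hy]; exact not_lt.mpr (le_of_lt hg))]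
      rw [ih (List.pairwise_cons.mp hp).2 (fun k hk => hne k (by simp [hk]))
        (fun k hk => hkey k (by simp [hk])) (fun hm => hmem (by simp [hm]))]
      have hc : ¬ decide (gdKey x < k) = true := by
        simpa using not_lt.mpr (le_of_lt hg)
      show _ = List.flatMap _ (PySem.List.insertBy _ _ (k :: ks))
      simp only [PySem.List.insertBy]
      rw [if_neg hc, List.flatMap_cons]
      have hb : ¬ (gdKey x == k) = true := by simp [hxk]
      simp [hb]

theorem gdSK_pairwise (xs : List String) : (gdSK xs).Pairwise (· < ·) := by
  unfold gdSK
  rw [PySem.List.dedup_eq_ofList]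
  exact PySem.List.sorted_ofList_pairwise_lt (xs.map gdKey)

theorem gdSK_mem (xs : List String) (k : String) : k ∈ gdSK xs ↔ k ∈ xs.map gdKey := by
  unfold gdSK
  rw [PySem.List.mem_sorted, PySem.List.mem_dedup]

theorem gdF_ne (xs : List String) (k : String) (h : k ∈ xs.map gdKey) : gdF xs k ≠ [] := by
  obtain ⟨y, hy, hk⟩ := List.mem_map.mp h
  exact List.ne_nil_of_mem (a := y) (List.mem_filter.mpr ⟨hy, by simp [hk]⟩)

theorem gdF_key (xs : List String) (k : String) : ∀ y ∈ gdF xs k, gdKey y = k := by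
  intro y hy
  have := (List.mem_filter.mp hy).2
  simpa using this

-- A's stable sort decomposes as the concatenation of the per-key groups in sorted key order
theorem gd_sort_decomp (xs : List String) :
    PySem.List.sorted xs gdKey = (gdSK xs).flatMap (gdF xs) := by
  induction xs using List.reverseRecOn with
  | nil => rfl
  | append_singleton xs x ih =>
    rw [PySem.List.sorted_eq_foldl_insertBy, List.foldl_append,
      ← PySem.List.sorted_eq_foldl_insertBy, ih]
    simp only [List.foldl_cons, List.foldl_nil]
    have hFk : ∀ k, gdF (xs ++ [x]) k = gdF xs k ++ if gdKey x == k then [x] else [] := by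
      intro k; unfold gdF; rw [List.filter_append]
      cases hbe : gdKey x == k <;> simp [List.filter, hbe]
    by_cases hmem : gdKey x ∈ xs.map gdKey
    · have hSK : gdSK (xs ++ [x]) = gdSK xs := by
        unfold gdSK
        rw [PySem.List.dedup_eq_ofList, PySem.List.dedup_eq_ofList]
        congr 1
        simp only [List.map_append, List.map_cons, List.map_nil, PySem.Set.ofList,
          List.foldl_append, List.foldl_cons, List.foldl_nil]
        show PySem.Set.add _ _ = _
        rw [PySem.Set.add, if_pos]
        rw [PySem.Set.contains_iff]
        show gdKey x ∈ PySem.Set.ofList (xs.map gdKey)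
        rw [PySem.Set.mem_ofList]; exact hmem
      rw [hSK, gd_insert_mem x (gdSK xs) (gdF xs) (gdSK_pairwise xs)
        (fun k hk => gdF_ne xs k ((gdSK_mem xs k).mp hk))
        (fun k _ => gdF_key xs k) ((gdSK_mem xs (gdKey x)).mpr hmem)]
      exact (List.flatMap_congr (fun k _ => (hFk k).symm))
    · have hSK : gdSK (xs ++ [x]) =
          PySem.List.insertBy (fun a b => decide (a < b)) (gdKey x) (gdSK xs) := by
        unfold gdSK
        rw [PySem.List.dedup_eq_ofList, PySem.List.dedup_eq_ofList]
        have hadd : PySem.Set.ofList ((xs ++ [x]).map gdKey)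
            = PySem.Set.ofList (xs.map gdKey) ++ [gdKey x] := by
          simp only [List.map_append, List.map_cons, List.map_nil, PySem.Set.ofList,
            List.foldl_append, List.foldl_cons, List.foldl_nil]
          show PySem.Set.add _ _ = _
          rw [PySem.Set.add, if_neg]
          rw [PySem.Set.contains_iff]
          show ¬ gdKey x ∈ PySem.Set.ofList (xs.map gdKey)
          rw [PySem.Set.mem_ofList]; exact hmem
        rw [hadd, PySem.List.sorted_eq_foldl_insertBy, List.foldl_append,
          ← PySem.List.sorted_eq_foldl_insertBy]
        rfl
      rw [hSK, gd_insert_notmem x (gdSK xs) (gdF xs) (gdSK_pairwise xs)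
        (fun k hk => gdF_ne xs k ((gdSK_mem xs k).mp hk))
        (fun k _ => gdF_key xs k)
        (fun hm => hmem ((gdSK_mem xs (gdKey x)).mp hm))
        (by
          unfold gdF
          rw [List.filter_eq_nil_iff]
          intro y hy hk
          exact hmem (List.mem_map.mpr ⟨y, hy, by simpa using hk⟩))]
      exact (List.flatMap_congr (fun k _ => (hFk k).symm))

theorem gdRunsAux_run (g : List String) (k : String) :
    ∀ cur acc rest, (∀ y ∈ g, gdKey y = k) →
    gdRunsAux k cur acc (g ++ rest) = gdRunsAux k (cur ++ g) acc rest := by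
  induction g with
  | nil => intro cur acc rest _; simp
  | cons y g ih =>
    intro cur acc rest h
    have hy : gdKey y = k := h y (by simp)
    have hc : (gdKey y == k) = true := by simp [hy]
    simp only [List.cons_append, gdRunsAux]
    rw [if_pos hc, ih _ _ _ (fun z hz => h z (by simp [hz]))]
    simp

theorem gdRunsAux_groups (ks : List String) (G : String → List String) :
    ∀ k cur acc, ks.Pairwise (· < ·) → (∀ k' ∈ ks, k < k') →
    (∀ k' ∈ ks, G k' ≠ []) → (∀ k' ∈ ks, ∀ y ∈ G k', gdKey y = k') →
    gdRunsAux k cur acc (ks.flatMap G) = acc ++ cur :: ks.map G := by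
  induction ks with
  | nil => intro k cur acc _ _ _ _; simp [gdRunsAux]
  | cons k' ks ih =>
    intro k cur acc hp hgt hne hkey
    obtain ⟨y, g, hy⟩ := List.exists_cons_of_ne_nil (hne k' (by simp))
    have hky : gdKey y = k' := hkey k' (by simp) y (by simp [hy])
    have hne' : ¬ (gdKey y == k) = true := by
      simp [hky]; exact ne_of_gt (hgt k' (by simp))
    simp only [List.flatMap_cons, hy, List.cons_append, gdRunsAux]
    rw [if_neg hne', hky, gdRunsAux_run g k' [y] (acc ++ [cur]) _
      (fun z hz => hkey k' (by simp) z (by simp [hy, hz]))]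
    simp only [List.singleton_append]
    rw [ih k' (y :: g) (acc ++ [cur]) (List.pairwise_cons.mp hp).2
      (fun k2 hk2 => (List.pairwise_cons.mp hp).1 k2 hk2)
      (fun k2 hk2 => hne k2 (by simp [hk2]))
      (fun k2 hk2 => hkey k2 (by simp [hk2]))]
    simp [hy]

theorem gd_A_eq (xs : List String) : group_departments xs = (gdSK xs).map (gdF xs) := by
  unfold group_departments
  rw [gd_sort_decomp]
  rcases hks : gdSK xs with _ | ⟨k0, ks⟩
  · rfl
  · have hp := gdSK_pairwise xs
    rw [hks] at hp
    have hne : ∀ k ∈ gdSK xs, gdF xs k ≠ [] :=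
      fun k hk => gdF_ne xs k ((gdSK_mem xs k).mp hk)
    obtain ⟨y, g, hy⟩ := List.exists_cons_of_ne_nil (hne k0 (by rw [hks]; simp))
    have hky : gdKey y = k0 := gdF_key xs k0 y (by simp [hy])
    simp only [List.flatMap_cons, hy, List.cons_append]
    rw [hky, gdRunsAux_run g k0 [y] [] _
      (fun z hz => gdF_key xs k0 z (by simp [hy, hz]))]
    simp only [List.singleton_append]
    rw [gdRunsAux_groups ks (gdF xs) k0 (y :: g) [] (List.pairwise_cons.mp hp).2
      (fun k2 hk2 => (List.pairwise_cons.mp hp).1 k2 hk2)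
      (fun k2 hk2 => hne k2 (by rw [hks]; simp [hk2]))
      (fun k2 _ => gdF_key xs k2)]
    simp [hy]

theorem gd_getD_fold (l : List String) :
    ∀ (d : PySem.Dict String (List String)) (k : String),
    (l.foldl (fun d x => d.modify (gdKey x) [] (fun t => t ++ [x])) d).getD k []
      = d.getD k [] ++ gdF l k := by
  induction l with
  | nil => intro d k; simp [gdF]
  | cons x l ih =>
    intro d k
    simp only [List.foldl_cons]
    rw [ih]
    rw [PySem.Dict.getD_modify]
    unfold gdF
    by_cases h : k = gdKey x
    · simp [List.filter, h]
    · have : ¬ (gdKey x == k) = true := by simp; exact fun he => h he.symm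
      simp [List.filter, this, h]

theorem gd_B_eq (xs : List String) : group_departments_alt xs = (gdSK xs).map (gdF xs) := by
  unfold group_departments_alt
  have hkeys : (xs.foldl (fun d x => d.modify (gdKey x) [] (fun t => t ++ [x]))
      PySem.Dict.empty).keys = PySem.List.dedup (xs.map gdKey) := by
    rw [PySem.Dict.keys_foldl_modify_key xs gdKey [] (fun _ x t => t ++ [x])]
    rw [PySem.List.dedup_eq_ofList]
    rfl
  simp only [hkeys]
  apply List.map_congr_left
  intro k _
  rw [gd_getD_fold]
  simp

-- ===== VERDICT (by name: the statement is the Claim_ definition above) =====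
theorem group_departments_spec : Claim_equal_group_departments := by
  intro departments _
  unfold Spec_group_departments
  rw [gd_A_eq, gd_B_eq]
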